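-- pv_equiv track=rewrite | github.com/Muzsy/VRS_nesting | scripts/experiments/debug_nested_island_contours.py | compute_containment_depth
-- ===== SOURCE A (Python) =====
-- def compute_containment_depth(contour_key, contained_by_map, depth_cache=None):
--     """Compute the nesting depth of a contour (0 = top-level)."""
--     if depth_cache is None:
--         depth_cache = {}
--     if contour_key in depth_cache:
--         return depth_cache[contour_key]
--     parents = contained_by_map.get(contour_key, [])
--     if not parents:
--         depth = 0
--     else:
--         depth = 1 + max(
--             compute_containment_depth(p, contained_by_map, depth_cache)
--             for p in parents
--         )
--     depth_cache[contour_key] = depth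
--     return depth
-- ===== SOURCE B (Python) =====
-- def compute_containment_depth(contour_key, contained_by_map, depth_cache=None):
--     """Compute the nesting depth of a contour (0 = top-level).
--
--     Round-based fixed-point (Bellman-Ford style) instead of memoized recursion;
--     agrees with the recursive version's RETURN VALUE (it does not populate
--     depth_cache with the ancestors' depths the way the recursion does).
--     """
--     if depth_cache is None:
--         depth_cache = {}
--     nodes = {contour_key: None}
--     for k, ps in contained_by_map.items():
--         nodes[k] = None
--         for p in ps:
--             nodes[p] = None
--     depth = {k: 0 for k in nodes}
--     for _ in range(len(nodes) + 1):
--         new_depth = {}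
--         for k in nodes:
--             if k in depth_cache:
--                 new_depth[k] = depth_cache[k]
--             else:
--                 ps = contained_by_map.get(k, [])
--                 new_depth[k] = 0 if not ps else 1 + max(depth[p] for p in ps)
--         depth = new_depth
--     return depth[contour_key]
-- ===== Notes on version B (the rewrite author's own statement) =====
-- stated objective: alternative
-- what changed: Replaces A's memoized top-down recursion with a bottom-up Bellman-Ford-style fixed-point iteration: build the set of all contour ids, then relax a depth table len(nodes)+1 rounds and read off the key's depth (return value only; B does not write ancestors' depths into depth_cache).
import Mathlib
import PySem

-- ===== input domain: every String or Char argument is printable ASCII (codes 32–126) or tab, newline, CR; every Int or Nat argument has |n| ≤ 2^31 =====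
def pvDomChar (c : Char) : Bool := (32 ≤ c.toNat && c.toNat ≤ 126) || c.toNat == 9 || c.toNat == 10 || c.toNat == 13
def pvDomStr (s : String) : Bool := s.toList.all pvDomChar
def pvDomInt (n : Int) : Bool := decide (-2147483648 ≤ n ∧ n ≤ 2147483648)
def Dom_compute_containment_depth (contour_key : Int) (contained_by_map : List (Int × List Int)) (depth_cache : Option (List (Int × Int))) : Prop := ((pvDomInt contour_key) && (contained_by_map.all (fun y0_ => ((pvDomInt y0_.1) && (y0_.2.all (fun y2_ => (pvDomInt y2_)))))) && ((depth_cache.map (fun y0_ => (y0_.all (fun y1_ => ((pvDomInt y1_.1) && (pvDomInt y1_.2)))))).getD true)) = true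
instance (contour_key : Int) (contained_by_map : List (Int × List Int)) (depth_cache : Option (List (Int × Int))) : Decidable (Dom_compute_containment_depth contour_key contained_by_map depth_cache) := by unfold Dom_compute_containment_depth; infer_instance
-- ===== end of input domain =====

-- B replaces A's memoized recursion by a round-based fixed-point iteration (alternative algorithm,
-- not faster); equivalence is about the RETURN value only — A also mutates a caller-supplied
-- depth_cache with the ancestors' depths, which B does not.

-- ===== PORT A =====
-- contained_by_map.get(k, [])
def pvAdj (m : List (Int × List Int)) (k : Int) : List Int :=
  ((PySem.Dict.mk m).get? k).getD []

-- fuel bound: larger than the number of contour ids occurring in the input, hence larger than any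
-- acyclic chain of recursive calls; proved below to never run out on inputs satisfying Pre_
def pvFuel (contour_key : Int) (m : List (Int × List Int)) : Nat :=
  (contour_key :: (m.map Prod.fst ++ m.flatMap Prod.snd)).length + 1

-- the recursive body of A: returns (depth, updated cache); Python's max over the generator
-- is the left fold of max over the recursive calls, threading the cache
def pvAAux (m : List (Int × List Int)) : Nat → Int → PySem.Dict Int Int → Int × PySem.Dict Int Int
  | 0, _, c => (0, c)       -- fuel exhaustion (unreachable under Pre_)
  | f + 1, k, c =>
    match c.get? k with
    | some v => (v, c)
    | none =>
      match pvAdj m k with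
      | [] => (0, c.insert k 0)
      | q :: rest =>
        let s0 := pvAAux m f q c
        let s := rest.foldl (fun s p =>
          let t := pvAAux m f p s.2
          (max s.1 t.1, t.2)) s0
        (1 + s.1, s.2.insert k (1 + s.1))

def compute_containment_depth (contour_key : Int) (contained_by_map : List (Int × List Int)) (depth_cache : Option (List (Int × Int))) : Int :=
  (pvAAux contained_by_map (pvFuel contour_key contained_by_map) contour_key
    (PySem.Dict.mk (depth_cache.getD []))).1

-- ===== PORT B =====
-- nodes = {contour_key: None} then every key and every parent, in order (an ordered set)
def pvNodes (contour_key : Int) (m : List (Int × List Int)) : List Int :=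
  m.foldl (fun s kv => kv.2.foldl (fun s p => PySem.Set.add s p) (PySem.Set.add s kv.1)) [contour_key]

-- the value `new_depth[k]` of one relaxation round (`depth[p]` is total in Python because every
-- parent of a node is itself a node — proved below — so `tbl.getD p 0` is exact for it)
def pvRVal (m : List (Int × List Int)) (c0 : PySem.Dict Int Int) (tbl : PySem.Dict Int Int) (k : Int) : Int :=
  match c0.get? k with
  | some v => v
  | none =>
    match pvAdj m k with
    | [] => 0
    | q :: rest => 1 + rest.foldl (fun a p => max a (tbl.getD p 0)) (tbl.getD q 0)

-- one relaxation round: new_depth = {k: … for k in nodes}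
def pvRound (m : List (Int × List Int)) (c0 : PySem.Dict Int Int) (nodes : List Int)
    (tbl : PySem.Dict Int Int) : PySem.Dict Int Int :=
  nodes.foldl (fun nd k => nd.insert k (pvRVal m c0 tbl k)) PySem.Dict.empty

-- depth = {k: 0 for k in nodes}
def pvInit (contour_key : Int) (m : List (Int × List Int)) : PySem.Dict Int Int :=
  (pvNodes contour_key m).foldl (fun d k => d.insert k 0) PySem.Dict.empty

def compute_containment_depth_alt (contour_key : Int) (contained_by_map : List (Int × List Int)) (depth_cache : Option (List (Int × Int))) : Int :=
  let c0 := PySem.Dict.mk (depth_cache.getD [])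
  let nodes := pvNodes contour_key contained_by_map
  let final := (List.range (nodes.length + 1)).foldl
    (fun tbl _ => pvRound contained_by_map c0 nodes tbl) (pvInit contour_key contained_by_map)
  final.getD contour_key 0   -- contour_key ∈ nodes, so this is Python's depth[contour_key]

-- ===== PRECONDITION & SPEC =====
-- graph reachability through uncached contours: one step adds the parents of uncached members
def pvStep (m : List (Int × List Int)) (c0 : PySem.Dict Int Int) (S : List Int) : List Int :=
  (S ++ S.flatMap (fun k => if (c0.get? k).isNone then pvAdj m k else [])).dedup

-- contours reachable from x through uncached contours (pvFuel iterations reach the closure)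
def pvRch (contour_key : Int) (m : List (Int × List Int)) (c0 : PySem.Dict Int Int) (x : Int) : List Int :=
  (pvStep m c0)^[pvFuel contour_key m] [x]

-- Pre_ excludes exactly the inputs on which A's recursion never terminates (Python: RecursionError):
-- those where some contour reachable from contour_key through uncached contours lies on a
-- parent-graph cycle of uncached contours.
def Pre_compute_containment_depth (contour_key : Int) (contained_by_map : List (Int × List Int)) (depth_cache : Option (List (Int × Int))) : Prop :=
  ∀ k ∈ pvRch contour_key contained_by_map (PySem.Dict.mk (depth_cache.getD [])) contour_key,
    (PySem.Dict.mk (depth_cache.getD [])).get? k = none →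
    ∀ p ∈ pvAdj contained_by_map k,
      k ∉ pvRch contour_key contained_by_map (PySem.Dict.mk (depth_cache.getD [])) p

instance (contour_key : Int) (contained_by_map : List (Int × List Int)) (depth_cache : Option (List (Int × Int))) : Decidable (Pre_compute_containment_depth contour_key contained_by_map depth_cache) := by
  unfold Pre_compute_containment_depth; infer_instance

def pvWitness_compute_containment_depth : Int × (List (Int × List Int)) × (Option (List (Int × Int))) :=
  (0, [(0, [1]), (1, [])], some [(2, 5)])

def Spec_compute_containment_depth (contour_key : Int) (contained_by_map : List (Int × List Int)) (depth_cache : Option (List (Int × Int))) (out : Int) : Prop := out = compute_containment_depth_alt contour_key contained_by_map depth_cache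
instance (contour_key : Int) (contained_by_map : List (Int × List Int)) (depth_cache : Option (List (Int × Int))) (out : Int) : Decidable (Spec_compute_containment_depth contour_key contained_by_map depth_cache out) := by unfold Spec_compute_containment_depth; infer_instance

-- ===== CLAIM (what is proved, stated in full; the proofs are below) =====
def Claim_equal_compute_containment_depth : Prop := ∀ (contour_key : Int) (contained_by_map : List (Int × List Int)) (depth_cache : Option (List (Int × Int))), Dom_compute_containment_depth contour_key contained_by_map depth_cache → Pre_compute_containment_depth contour_key contained_by_map depth_cache → Spec_compute_containment_depth contour_key contained_by_map depth_cache (compute_containment_depth contour_key contained_by_map depth_cache)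

-- ===== LEMMAS AND PROOFS =====

-- the common mathematical depth function both ports compute: fueled depth
def pvD (m : List (Int × List Int)) (c0 : PySem.Dict Int Int) : Nat → Int → Int
  | 0, _ => 0
  | f + 1, k =>
    match c0.get? k with
    | some v => v
    | none =>
      match pvAdj m k with
      | [] => 0
      | q :: rest => 1 + rest.foldl (fun a p => max a (pvD m c0 f p)) (pvD m c0 f q)

-- rank of a contour: size of its uncached-reachability closure (the induction measure)
def pvRank (contour_key : Int) (m : List (Int × List Int)) (c0 : PySem.Dict Int Int) (x : Int) : Nat :=
  (pvRch contour_key m c0 x).length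

-- ---- unfolding equations for the fueled depth and the two ports' bodies ----

lemma pvD_succ_cached {m : List (Int × List Int)} {c0 : PySem.Dict Int Int} {k v : Int}
    (f : Nat) (hc : c0.get? k = some v) : pvD m c0 (f + 1) k = v := by
  simp [pvD, hc]

lemma pvD_succ_leaf {m : List (Int × List Int)} {c0 : PySem.Dict Int Int} {k : Int}
    (f : Nat) (hc : c0.get? k = none) (ha : pvAdj m k = []) : pvD m c0 (f + 1) k = 0 := by
  simp [pvD, hc, ha]

lemma pvD_succ_node {m : List (Int × List Int)} {c0 : PySem.Dict Int Int} {k q : Int}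
    {rest : List Int} (f : Nat) (hc : c0.get? k = none) (ha : pvAdj m k = q :: rest) :
    pvD m c0 (f + 1) k
      = 1 + rest.foldl (fun a p => max a (pvD m c0 f p)) (pvD m c0 f q) := by
  simp [pvD, hc, ha]

lemma pvAAux_cached {m : List (Int × List Int)} {c : PySem.Dict Int Int} {k v : Int}
    (f : Nat) (hck : c.get? k = some v) : pvAAux m (f + 1) k c = (v, c) := by
  simp [pvAAux, hck]

lemma pvAAux_leaf {m : List (Int × List Int)} {c : PySem.Dict Int Int} {k : Int}
    (f : Nat) (hck : c.get? k = none) (ha : pvAdj m k = []) :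
    pvAAux m (f + 1) k c = (0, c.insert k 0) := by
  simp [pvAAux, hck, ha]

lemma pvAAux_node {m : List (Int × List Int)} {c : PySem.Dict Int Int} {k q : Int}
    {rest : List Int} (f : Nat) (hck : c.get? k = none) (ha : pvAdj m k = q :: rest) :
    pvAAux m (f + 1) k c
      = (1 + (rest.foldl (fun s p => ((max s.1 (pvAAux m f p s.2).1, (pvAAux m f p s.2).2) : Int × PySem.Dict Int Int)) (pvAAux m f q c)).1,
         (rest.foldl (fun s p => ((max s.1 (pvAAux m f p s.2).1, (pvAAux m f p s.2).2) : Int × PySem.Dict Int Int)) (pvAAux m f q c)).2.insert k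
           (1 + (rest.foldl (fun s p => ((max s.1 (pvAAux m f p s.2).1, (pvAAux m f p s.2).2) : Int × PySem.Dict Int Int)) (pvAAux m f q c)).1)) := by
  simp [pvAAux, hck, ha]

lemma pvRVal_cached {m : List (Int × List Int)} {c0 tbl : PySem.Dict Int Int} {k v : Int}
    (hc : c0.get? k = some v) : pvRVal m c0 tbl k = v := by
  simp [pvRVal, hc]

lemma pvRVal_leaf {m : List (Int × List Int)} {c0 tbl : PySem.Dict Int Int} {k : Int}
    (hc : c0.get? k = none) (ha : pvAdj m k = []) : pvRVal m c0 tbl k = 0 := by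
  simp [pvRVal, hc, ha]

lemma pvRVal_node {m : List (Int × List Int)} {c0 tbl : PySem.Dict Int Int} {k q : Int}
    {rest : List Int} (hc : c0.get? k = none) (ha : pvAdj m k = q :: rest) :
    pvRVal m c0 tbl k
      = 1 + rest.foldl (fun a p => max a (tbl.getD p 0)) (tbl.getD q 0) := by
  simp [pvRVal, hc, ha]

-- ---- generic list facts ----

lemma pv_nodup_subset_length {l l' : List Int} (hnd : l.Nodup) (hsub : l ⊆ l') :
    l.length ≤ l'.length := by
  have h1 : l.toFinset ⊆ l'.toFinset := by
    intro a ha; rw [List.mem_toFinset] at *; exact hsub ha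
  have h2 := Finset.card_le_card h1
  rw [List.toFinset_card_of_nodup hnd] at h2
  exact le_trans h2 l'.toFinset_card_le

lemma pv_nodup_ssubset_length {l l' : List Int} (hnd : l.Nodup) (hnd' : l'.Nodup)
    (hsub : l ⊆ l') {a : Int} (ha : a ∈ l') (hna : a ∉ l) : l.length < l'.length := by
  have h1 : l.toFinset ⊂ l'.toFinset := by
    constructor
    · intro b hb; rw [List.mem_toFinset] at *; exact hsub hb
    · intro hc
      exact hna (by rw [← List.mem_toFinset]; exact hc (List.mem_toFinset.mpr ha))
  have h2 := Finset.card_lt_card h1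
  rwa [List.toFinset_card_of_nodup hnd, List.toFinset_card_of_nodup hnd'] at h2

lemma pv_get?_foldl_insert (l : List Int) (g : Int → Int) (d : PySem.Dict Int Int) (x : Int) :
    (l.foldl (fun d k => d.insert k (g k)) d).get? x = if x ∈ l then some (g x) else d.get? x := by
  induction l generalizing d with
  | nil => simp
  | cons a t ih =>
    rw [List.foldl_cons, ih]
    by_cases hx : x ∈ t <;> by_cases hxa : x = a <;>
      simp [hx, hxa, PySem.Dict.get?_insert]

lemma pv_range_foldl {α : Type} (h : α → α) (init : α) :
    ∀ n : Nat, (List.range n).foldl (fun t _ => h t) init = h^[n] init := by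
  intro n
  induction n with
  | zero => simp
  | succ n ih =>
    rw [List.range_succ, List.foldl_append, ih, List.foldl_cons, List.foldl_nil,
      Function.iterate_succ_apply']

-- ---- the adjacency and the universe ----

lemma pv_adj_subset (m : List (Int × List Int)) (k : Int) :
    pvAdj m k ⊆ m.flatMap Prod.snd := by
  unfold pvAdj
  cases h : (PySem.Dict.mk m).get? k with
  | none => simp
  | some l =>
    intro p hp
    have hm : (k, l) ∈ m := PySem.Dict.mem_items_of_get?_eq_some _ h
    exact List.mem_flatMap.mpr ⟨(k, l), hm, by simpa using hp⟩

-- ---- the reachability closure ----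

lemma pv_subset_step (m : List (Int × List Int)) (c0 : PySem.Dict Int Int) (S : List Int) :
    S ⊆ pvStep m c0 S := by
  intro x hx
  unfold pvStep
  rw [List.mem_dedup]
  exact List.mem_append_left _ hx

lemma pv_mem_step_of_adj (m : List (Int × List Int)) (c0 : PySem.Dict Int Int) {S : List Int}
    {k p : Int} (hk : k ∈ S) (hc : c0.get? k = none) (hp : p ∈ pvAdj m k) :
    p ∈ pvStep m c0 S := by
  unfold pvStep
  rw [List.mem_dedup]
  refine List.mem_append_right _ (List.mem_flatMap.mpr ⟨k, hk, ?_⟩)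
  simp [hc, hp]

lemma pv_step_bounded (m : List (Int × List Int)) (c0 : PySem.Dict Int Int) (x : Int)
    {S : List Int} (h : S ⊆ x :: m.flatMap Prod.snd) :
    pvStep m c0 S ⊆ x :: m.flatMap Prod.snd := by
  intro y hy
  unfold pvStep at hy
  rw [List.mem_dedup, List.mem_append] at hy
  rcases hy with h1 | h2
  · exact h h1
  · rw [List.mem_flatMap] at h2
    obtain ⟨k, _, hyk⟩ := h2
    split at hyk
    · exact List.mem_cons_of_mem _ (pv_adj_subset m k hyk)
    · simp at hyk

lemma pv_rch_bounded (ck : Int) (m : List (Int × List Int)) (c0 : PySem.Dict Int Int) (x : Int) :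
    pvRch ck m c0 x ⊆ x :: m.flatMap Prod.snd := by
  unfold pvRch
  generalize pvFuel ck m = N
  induction N with
  | zero =>
    intro y hy
    simp only [Function.iterate_zero, id_eq, List.mem_singleton] at hy
    rw [hy]; exact List.mem_cons_self
  | succ n ih =>
    rw [Function.iterate_succ_apply']
    exact pv_step_bounded m c0 x ih

lemma pv_rch_nodup (ck : Int) (m : List (Int × List Int)) (c0 : PySem.Dict Int Int) (x : Int) :
    (pvRch ck m c0 x).Nodup := by
  unfold pvRch pvFuel
  rw [Function.iterate_succ_apply']
  exact List.nodup_dedup _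

lemma pv_mem_rch_self (ck : Int) (m : List (Int × List Int)) (c0 : PySem.Dict Int Int) (x : Int) :
    x ∈ pvRch ck m c0 x := by
  unfold pvRch
  generalize pvFuel ck m = N
  induction N with
  | zero => simp
  | succ n ih =>
    rw [Function.iterate_succ_apply']
    exact pv_subset_step m c0 _ ih

lemma pv_rch_least (ck : Int) (m : List (Int × List Int)) (c0 : PySem.Dict Int Int) (x : Int)
    {T : List Int} (hx : x ∈ T)
    (hcl : ∀ k ∈ T, c0.get? k = none → ∀ p ∈ pvAdj m k, p ∈ T) :
    pvRch ck m c0 x ⊆ T := by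
  unfold pvRch
  generalize pvFuel ck m = N
  induction N with
  | zero =>
    intro y hy
    simp only [Function.iterate_zero, id_eq, List.mem_singleton] at hy
    rw [hy]; exact hx
  | succ n ih =>
    rw [Function.iterate_succ_apply']
    intro y hy
    unfold pvStep at hy
    rw [List.mem_dedup, List.mem_append] at hy
    rcases hy with h1 | h2
    · exact ih h1
    · rw [List.mem_flatMap] at h2
      obtain ⟨k, hk, hyk⟩ := h2
      by_cases hc : (c0.get? k).isNone
      · rw [if_pos hc] at hyk
        exact hcl k (ih hk) (Option.isNone_iff_eq_none.mp hc) y hyk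
      · rw [if_neg hc] at hyk; simp at hyk

-- toFinset-congruence of a step: the step's member set depends only on the input's member set
lemma pv_step_toFinset_congr (m : List (Int × List Int)) (c0 : PySem.Dict Int Int)
    {S T : List Int} (h : S.toFinset = T.toFinset) :
    (pvStep m c0 S).toFinset = (pvStep m c0 T).toFinset := by
  have hmem : ∀ b : Int, b ∈ S ↔ b ∈ T := by
    intro b; rw [← List.mem_toFinset, h, List.mem_toFinset]
  ext a
  simp only [List.mem_toFinset, pvStep, List.mem_dedup, List.mem_append, List.mem_flatMap]
  constructor
  · rintro (h1 | ⟨k, hk, hyk⟩)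
    · exact Or.inl ((hmem a).mp h1)
    · exact Or.inr ⟨k, (hmem k).mp hk, hyk⟩
  · rintro (h1 | ⟨k, hk, hyk⟩)
    · exact Or.inl ((hmem a).mpr h1)
    · exact Or.inr ⟨k, (hmem k).mpr hk, hyk⟩

-- the closure is closed: pvFuel iterations are enough to saturate
lemma pv_step_rch_subset (ck : Int) (m : List (Int × List Int)) (c0 : PySem.Dict Int Int) (x : Int) :
    pvStep m c0 (pvRch ck m c0 x) ⊆ pvRch ck m c0 x := by
  have hmono : ∀ i : Nat, ((pvStep m c0)^[i] [x]).toFinset ⊆ ((pvStep m c0)^[i + 1] [x]).toFinset := by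
    intro i a ha
    rw [List.mem_toFinset] at *
    rw [Function.iterate_succ_apply']
    exact pv_subset_step m c0 _ ha
  have hbdd : ∀ i : Nat, (pvStep m c0)^[i] [x] ⊆ x :: m.flatMap Prod.snd := by
    intro i
    induction i with
    | zero =>
      intro y hy
      simp only [Function.iterate_zero, id_eq, List.mem_singleton] at hy
      rw [hy]; exact List.mem_cons_self
    | succ n ih =>
      rw [Function.iterate_succ_apply']
      exact pv_step_bounded m c0 x ih
  have hcard : ∀ i : Nat, ((pvStep m c0)^[i] [x]).toFinset.card ≤ (x :: m.flatMap Prod.snd).length := by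
    intro i
    calc ((pvStep m c0)^[i] [x]).toFinset.card ≤ (x :: m.flatMap Prod.snd).toFinset.card :=
          Finset.card_le_card (by intro a ha; rw [List.mem_toFinset] at *; exact hbdd i ha)
      _ ≤ (x :: m.flatMap Prod.snd).length := (x :: m.flatMap Prod.snd).toFinset_card_le
  have hVlen : (x :: m.flatMap Prod.snd).length < pvFuel ck m + 1 := by
    simp only [pvFuel, List.length_cons, List.length_append, List.length_map]
    omega
  have hexists : ∃ i < pvFuel ck m, ((pvStep m c0)^[i + 1] [x]).toFinset = ((pvStep m c0)^[i] [x]).toFinset := by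
    by_contra hcon
    push Not at hcon
    have hgrow : ∀ i, i ≤ pvFuel ck m → i + 1 ≤ ((pvStep m c0)^[i] [x]).toFinset.card := by
      intro i
      induction i with
      | zero =>
        intro _
        have hx0 : x ∈ ((pvStep m c0)^[0] [x]).toFinset := by simp
        have := Finset.card_pos.mpr ⟨x, hx0⟩
        omega
      | succ n ih =>
        intro hn
        have h1 := ih (by omega)
        have hne := hcon n (by omega)
        have hss : ((pvStep m c0)^[n] [x]).toFinset ⊂ ((pvStep m c0)^[n + 1] [x]).toFinset := by
          refine ⟨hmono n, fun hsub => hne (le_antisymm hsub (hmono n))⟩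
        have := Finset.card_lt_card hss
        omega
    have hg := hgrow (pvFuel ck m) le_rfl
    have hc := hcard (pvFuel ck m)
    omega
  obtain ⟨i, hiN, hfix⟩ := hexists
  have hstay : ∀ j : Nat, ((pvStep m c0)^[i + j] [x]).toFinset = ((pvStep m c0)^[i] [x]).toFinset := by
    intro j
    induction j with
    | zero => rfl
    | succ n ih =>
      have e1 : (pvStep m c0)^[i + (n + 1)] [x] = pvStep m c0 ((pvStep m c0)^[i + n] [x]) := by
        rw [show i + (n + 1) = (i + n) + 1 by omega, Function.iterate_succ_apply']
      rw [e1, pv_step_toFinset_congr m c0 ih,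
        show pvStep m c0 ((pvStep m c0)^[i] [x]) = (pvStep m c0)^[i + 1] [x] from
          (Function.iterate_succ_apply' (pvStep m c0) i [x]).symm]
      exact hfix
  have hN : ((pvStep m c0)^[pvFuel ck m] [x]).toFinset = ((pvStep m c0)^[i] [x]).toFinset := by
    have := hstay (pvFuel ck m - i)
    rwa [show i + (pvFuel ck m - i) = pvFuel ck m by omega] at this
  intro y hy
  have hy2 : y ∈ (pvStep m c0 ((pvStep m c0)^[pvFuel ck m] [x])).toFinset :=
    List.mem_toFinset.mpr hy
  rw [pv_step_toFinset_congr m c0 hN,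
    show pvStep m c0 ((pvStep m c0)^[i] [x]) = (pvStep m c0)^[i + 1] [x] from
      (Function.iterate_succ_apply' (pvStep m c0) i [x]).symm,
    hfix, ← hN] at hy2
  exact List.mem_toFinset.mp hy2

lemma pv_mem_rch_adj (ck : Int) (m : List (Int × List Int)) (c0 : PySem.Dict Int Int)
    {x k p : Int} (hk : k ∈ pvRch ck m c0 x) (hc : c0.get? k = none) (hp : p ∈ pvAdj m k) :
    p ∈ pvRch ck m c0 x :=
  pv_step_rch_subset ck m c0 x (pv_mem_step_of_adj m c0 hk hc hp)

-- under Pre_, a parent has strictly smaller rank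
lemma pv_rank_lt (ck : Int) (m : List (Int × List Int)) (c0 : PySem.Dict Int Int)
    (HP : ∀ k ∈ pvRch ck m c0 ck, c0.get? k = none → ∀ p ∈ pvAdj m k, k ∉ pvRch ck m c0 p)
    {k p : Int} (hk : k ∈ pvRch ck m c0 ck) (hc : c0.get? k = none) (hp : p ∈ pvAdj m k) :
    pvRank ck m c0 p < pvRank ck m c0 k := by
  have hpk : p ∈ pvRch ck m c0 k :=
    pv_mem_rch_adj ck m c0 (pv_mem_rch_self ck m c0 k) hc hp
  have hsub : pvRch ck m c0 p ⊆ pvRch ck m c0 k :=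
    pv_rch_least ck m c0 p hpk (fun j hj hcj q hq => pv_mem_rch_adj ck m c0 hj hcj hq)
  exact pv_nodup_ssubset_length (pv_rch_nodup ck m c0 p) (pv_rch_nodup ck m c0 k) hsub
    (pv_mem_rch_self ck m c0 k) (HP k hk hc p hp)

lemma pv_rank_pos (ck : Int) (m : List (Int × List Int)) (c0 : PySem.Dict Int Int) (k : Int) :
    1 ≤ pvRank ck m c0 k := by
  have h := pv_mem_rch_self ck m c0 k
  unfold pvRank
  exact List.length_pos_of_mem h

-- ---- stability of the fueled depth ----

lemma pv_stable (ck : Int) (m : List (Int × List Int)) (c0 : PySem.Dict Int Int)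
    (HP : ∀ k ∈ pvRch ck m c0 ck, c0.get? k = none → ∀ p ∈ pvAdj m k, k ∉ pvRch ck m c0 p) :
    ∀ (f : Nat) (k : Int), k ∈ pvRch ck m c0 ck → ∀ (g : Nat),
      pvRank ck m c0 k ≤ f → pvRank ck m c0 k ≤ g → pvD m c0 f k = pvD m c0 g k := by
  intro f
  induction f with
  | zero =>
    intro k _ g hf _
    have := pv_rank_pos ck m c0 k
    omega
  | succ f ih =>
    intro k hk g hf hg
    have hr1 := pv_rank_pos ck m c0 k
    cases g with
    | zero => omega
    | succ g =>
      cases hc : c0.get? k with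
      | some v => rw [pvD_succ_cached f hc, pvD_succ_cached g hc]
      | none =>
        cases ha : pvAdj m k with
        | nil => rw [pvD_succ_leaf f hc ha, pvD_succ_leaf g hc ha]
        | cons q rest =>
          rw [pvD_succ_node f hc ha, pvD_succ_node g hc ha]
          have hmem : ∀ p ∈ q :: rest, p ∈ pvRch ck m c0 ck ∧ pvRank ck m c0 p < pvRank ck m c0 k := by
            intro p hp
            rw [← ha] at hp
            exact ⟨pv_mem_rch_adj ck m c0 hk hc hp, pv_rank_lt ck m c0 HP hk hc hp⟩
          have hq := hmem q List.mem_cons_self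
          have hinit : pvD m c0 f q = pvD m c0 g q :=
            ih q hq.1 g (by omega) (by omega)
          rw [hinit]
          congr 1
          apply PySem.List.foldl_congr_mem'
          intro p hp acc
          have hpm := hmem p (List.mem_cons_of_mem _ hp)
          rw [ih p hpm.1 g (by omega) (by omega)]

-- ---- correctness of port A's memoized recursion ----

def pvExt (c c' : PySem.Dict Int Int) : Prop :=
  ∀ x v, c.get? x = some v → c'.get? x = some v

lemma pv_ext_refl (c : PySem.Dict Int Int) : pvExt c c := fun _ _ h => h

lemma pv_ext_trans {a b c : PySem.Dict Int Int} (h1 : pvExt a b) (h2 : pvExt b c) : pvExt a c :=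
  fun x v h => h2 x v (h1 x v h)

def pvInv (ck : Int) (m : List (Int × List Int)) (c0 c : PySem.Dict Int Int) : Prop :=
  pvExt c0 c ∧ ∀ x v, c.get? x = some v →
    c0.get? x = some v ∨
    (c0.get? x = none ∧ x ∈ pvRch ck m c0 ck ∧ v = pvD m c0 (pvRank ck m c0 x) x)

lemma pv_A_correct (ck : Int) (m : List (Int × List Int)) (c0 : PySem.Dict Int Int)
    (HP : ∀ k ∈ pvRch ck m c0 ck, c0.get? k = none → ∀ p ∈ pvAdj m k, k ∉ pvRch ck m c0 p) :
    ∀ (f : Nat) (k : Int) (c : PySem.Dict Int Int),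
      k ∈ pvRch ck m c0 ck → pvRank ck m c0 k ≤ f → pvInv ck m c0 c →
      (pvAAux m f k c).1 = pvD m c0 (pvRank ck m c0 k) k ∧
      pvInv ck m c0 (pvAAux m f k c).2 ∧ pvExt c (pvAAux m f k c).2 := by
  intro f
  induction f with
  | zero =>
    intro k c _ hf _
    have := pv_rank_pos ck m c0 k
    omega
  | succ f ih =>
    intro k c hk hf hinv
    obtain ⟨r, hr⟩ : ∃ r, pvRank ck m c0 k = r + 1 := by
      have := pv_rank_pos ck m c0 k
      exact ⟨pvRank ck m c0 k - 1, by omega⟩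
    cases hck : c.get? k with
    | some v =>
      rw [pvAAux_cached f hck]
      refine ⟨?_, hinv, pv_ext_refl c⟩
      rcases hinv.2 k v hck with h0 | ⟨_, _, hval⟩
      · rw [hr, pvD_succ_cached r h0]
      · exact hval
    | none =>
      have hc0k : c0.get? k = none := by
        cases hc0 : c0.get? k with
        | none => rfl
        | some w => exact absurd (hinv.1 k w hc0) (by simp [hck])
      cases ha : pvAdj m k with
      | nil =>
        rw [pvAAux_leaf f hck ha]
        have hval : pvD m c0 (pvRank ck m c0 k) k = 0 := by
          rw [hr, pvD_succ_leaf r hc0k ha]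
        refine ⟨hval.symm, ⟨?_, ?_⟩, ?_⟩
        · intro x v hx
          have hxc := hinv.1 x v hx
          have hxk : x ≠ k := by
            intro h; rw [h, hc0k] at hx; simp at hx
          rw [PySem.Dict.get?_insert, if_neg hxk]
          exact hxc
        · intro x v hx
          rw [PySem.Dict.get?_insert] at hx
          by_cases hxk : x = k
          · subst hxk
            rw [if_pos rfl] at hx
            refine Or.inr ⟨hc0k, hk, ?_⟩
            rw [hval]
            injection hx with h
            exact h.symm
          · rw [if_neg hxk] at hx
            exact hinv.2 x v hx
        · intro x v hx
          have hxk : x ≠ k := by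
            intro h; rw [h, hck] at hx; simp at hx
          rw [PySem.Dict.get?_insert, if_neg hxk]
          exact hx
      | cons q rest =>
        rw [pvAAux_node f hck ha]
        have hmem : ∀ p ∈ q :: rest, p ∈ pvRch ck m c0 ck ∧ pvRank ck m c0 p ≤ f := by
          intro p hp
          rw [← ha] at hp
          have h1 := pv_mem_rch_adj ck m c0 hk hc0k hp
          have h2 := pv_rank_lt ck m c0 HP hk hc0k hp
          exact ⟨h1, by omega⟩
        have hq := hmem q List.mem_cons_self
        obtain ⟨hqval, hqinv, hqext⟩ := ih q c hq.1 hq.2 hinv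
        have hfold : ∀ (l : List Int), (∀ p ∈ l, p ∈ pvRch ck m c0 ck ∧ pvRank ck m c0 p ≤ f) →
            ∀ (s : Int × PySem.Dict Int Int), pvInv ck m c0 s.2 →
            (l.foldl (fun s p => ((max s.1 (pvAAux m f p s.2).1, (pvAAux m f p s.2).2) : Int × PySem.Dict Int Int)) s).1
              = l.foldl (fun a p => max a (pvD m c0 (pvRank ck m c0 p) p)) s.1 ∧
            pvInv ck m c0 (l.foldl (fun s p => ((max s.1 (pvAAux m f p s.2).1, (pvAAux m f p s.2).2) : Int × PySem.Dict Int Int)) s).2 ∧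
            pvExt s.2 (l.foldl (fun s p => ((max s.1 (pvAAux m f p s.2).1, (pvAAux m f p s.2).2) : Int × PySem.Dict Int Int)) s).2 := by
          intro l
          induction l with
          | nil => intro _ s hs; exact ⟨rfl, hs, pv_ext_refl _⟩
          | cons p t iht =>
            intro hl s hs
            have hp := hl p List.mem_cons_self
            obtain ⟨hpval, hpinv, hpext⟩ := ih p s.2 hp.1 hp.2 hs
            have htl : ∀ x ∈ t, x ∈ pvRch ck m c0 ck ∧ pvRank ck m c0 x ≤ f :=
              fun x hx => hl x (List.mem_cons_of_mem _ hx)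
            obtain ⟨hv, hi, he⟩ := iht htl
              (max s.1 (pvAAux m f p s.2).1, (pvAAux m f p s.2).2) hpinv
            refine ⟨?_, hi, pv_ext_trans hpext he⟩
            rw [List.foldl_cons, List.foldl_cons]
            rw [hv, hpval]
        have htail : ∀ p ∈ rest, p ∈ pvRch ck m c0 ck ∧ pvRank ck m c0 p ≤ f :=
          fun p hp => hmem p (List.mem_cons_of_mem _ hp)
        obtain ⟨hv, hi, he⟩ := hfold rest htail (pvAAux m f q c) hqinv
        have hvd : 1 + (rest.foldl (fun s p => ((max s.1 (pvAAux m f p s.2).1, (pvAAux m f p s.2).2) : Int × PySem.Dict Int Int)) (pvAAux m f q c)).1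
            = pvD m c0 (pvRank ck m c0 k) k := by
          rw [hv, hqval, hr, pvD_succ_node r hc0k ha]
          have hqlt := pv_rank_lt ck m c0 HP hk hc0k
            (show q ∈ pvAdj m k by rw [ha]; exact List.mem_cons_self)
          have hstq : pvD m c0 (pvRank ck m c0 q) q = pvD m c0 r q :=
            pv_stable ck m c0 HP (pvRank ck m c0 q) q hq.1 r le_rfl (by omega)
          rw [hstq]
          congr 1
          apply PySem.List.foldl_congr_mem'
          intro p hp acc
          have hpc := hmem p (List.mem_cons_of_mem _ hp)
          have hplt := pv_rank_lt ck m c0 HP hk hc0k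
            (show p ∈ pvAdj m k by rw [ha]; exact List.mem_cons_of_mem _ hp)
          rw [pv_stable ck m c0 HP (pvRank ck m c0 p) p hpc.1 r le_rfl (by omega)]
        refine ⟨hvd, ⟨?_, ?_⟩, ?_⟩
        · intro x v hx
          have hxc := hi.1 x v hx
          have hxk : x ≠ k := by
            intro h; rw [h, hc0k] at hx; simp at hx
          rw [PySem.Dict.get?_insert, if_neg hxk]
          exact hxc
        · intro x v hx
          rw [PySem.Dict.get?_insert] at hx
          by_cases hxk : x = k
          · subst hxk
            rw [if_pos rfl] at hx
            refine Or.inr ⟨hc0k, hk, ?_⟩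
            rw [← hvd]
            injection hx with h
            exact h.symm
          · rw [if_neg hxk] at hx
            exact hi.2 x v hx
        · intro x v hx
          have hx2 := pv_ext_trans hqext he x v hx
          by_cases hxk : x = k
          · subst hxk
            rcases hi.2 x v hx2 with h0 | ⟨_, _, hval⟩
            · rw [hc0k] at h0; simp at h0
            · rw [PySem.Dict.get?_insert, if_pos rfl, hval, ← hvd]
          · rw [PySem.Dict.get?_insert, if_neg hxk]
            exact hx2

-- ---- correctness of port B's rounds ----

lemma pv_mem_inner_foldl {x : Int} (l : List Int) (s : List Int) (hs : x ∈ s) :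
    x ∈ l.foldl (fun s p => PySem.Set.add s p) s := by
  induction l generalizing s with
  | nil => exact hs
  | cons p t ih =>
    rw [List.foldl_cons]
    exact ih _ ((PySem.Set.mem_add _ _ _).mpr (Or.inl hs))

lemma pv_mem_inner_foldl_of_mem {x : Int} (l : List Int) (s : List Int) (hx : x ∈ l) :
    x ∈ l.foldl (fun s p => PySem.Set.add s p) s := by
  induction l generalizing s with
  | nil => simp at hx
  | cons p t ih =>
    rw [List.foldl_cons]
    rcases List.mem_cons.mp hx with h | h
    · subst h
      exact pv_mem_inner_foldl t _ ((PySem.Set.mem_add _ _ _).mpr (Or.inr rfl))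
    · exact ih _ h

lemma pv_mem_nodes_of_mem (x : Int) :
    ∀ (l : List (Int × List Int)) (s : List Int), x ∈ s →
      x ∈ l.foldl (fun s kv => kv.2.foldl (fun s p => PySem.Set.add s p) (PySem.Set.add s kv.1)) s := by
  intro l
  induction l with
  | nil => intro s hs; exact hs
  | cons kv t ih =>
    intro s hs
    rw [List.foldl_cons]
    exact ih _ (pv_mem_inner_foldl kv.2 _ ((PySem.Set.mem_add _ _ _).mpr (Or.inl hs)))

lemma pv_mem_nodes_self (ck : Int) (m : List (Int × List Int)) : ck ∈ pvNodes ck m :=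
  pv_mem_nodes_of_mem ck m [ck] (List.mem_singleton.mpr rfl)

lemma pv_parents_mem_nodes_aux {p : Int} :
    ∀ (l : List (Int × List Int)) (s : List Int) (kv : Int × List Int), kv ∈ l → p ∈ kv.2 →
      p ∈ l.foldl (fun s kv => kv.2.foldl (fun s p => PySem.Set.add s p) (PySem.Set.add s kv.1)) s := by
  intro l
  induction l with
  | nil => intro s kv h; simp at h
  | cons a t ih =>
    intro s kv hkv hp
    rw [List.foldl_cons]
    rcases List.mem_cons.mp hkv with h | h
    · subst h
      exact pv_mem_nodes_of_mem p t _ (pv_mem_inner_foldl_of_mem kv.2 _ hp)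
    · exact ih _ kv h hp

lemma pv_adj_mem_nodes (ck : Int) (m : List (Int × List Int)) {k p : Int}
    (hp : p ∈ pvAdj m k) : p ∈ pvNodes ck m := by
  unfold pvAdj at hp
  cases h : (PySem.Dict.mk m).get? k with
  | none => rw [h] at hp; simp at hp
  | some l =>
    rw [h] at hp
    simp only [Option.getD_some] at hp
    have hm : (k, l) ∈ m := PySem.Dict.mem_items_of_get?_eq_some _ h
    exact pv_parents_mem_nodes_aux m [ck] (k, l) hm hp

lemma pv_round_get? (m : List (Int × List Int)) (c0 : PySem.Dict Int Int) (nodes : List Int)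
    (tbl : PySem.Dict Int Int) (x : Int) :
    (pvRound m c0 nodes tbl).get? x
      = if x ∈ nodes then some (pvRVal m c0 tbl x) else none := by
  unfold pvRound
  rw [pv_get?_foldl_insert nodes (fun k => pvRVal m c0 tbl k) PySem.Dict.empty x,
    PySem.Dict.get?_empty]

lemma pv_init_get? (ck : Int) (m : List (Int × List Int)) (x : Int) :
    (pvInit ck m).get? x = if x ∈ pvNodes ck m then some 0 else none := by
  unfold pvInit
  rw [pv_get?_foldl_insert (pvNodes ck m) (fun _ => (0 : Int)) PySem.Dict.empty x,
    PySem.Dict.get?_empty]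

lemma pv_B_val (ck : Int) (m : List (Int × List Int)) (c0 : PySem.Dict Int Int) :
    ∀ (i : Nat) (x : Int), x ∈ pvNodes ck m →
      ((pvRound m c0 (pvNodes ck m))^[i] (pvInit ck m)).get? x = some (pvD m c0 i x) := by
  intro i
  induction i with
  | zero =>
    intro x hx
    simp only [Function.iterate_zero, id_eq]
    rw [pv_init_get? ck m x, if_pos hx]
    rfl
  | succ i ih =>
    intro x hx
    rw [Function.iterate_succ_apply', pv_round_get?, if_pos hx]
    congr 1
    cases hc : c0.get? x with
    | some v => rw [pvRVal_cached hc, pvD_succ_cached i hc]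
    | none =>
      cases ha : pvAdj m x with
      | nil => rw [pvRVal_leaf hc ha, pvD_succ_leaf i hc ha]
      | cons q rest =>
        rw [pvRVal_node hc ha, pvD_succ_node i hc ha]
        have hgd : ∀ p ∈ q :: rest,
            ((pvRound m c0 (pvNodes ck m))^[i] (pvInit ck m)).getD p 0 = pvD m c0 i p := by
          intro p hp
          have hpn : p ∈ pvNodes ck m := pv_adj_mem_nodes ck m (by rw [ha]; exact hp)
          rw [PySem.Dict.getD_eq_get?_getD, ih p hpn]
          rfl
        rw [hgd q List.mem_cons_self]
        congr 1
        apply PySem.List.foldl_congr_mem'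
        intro p hp acc
        rw [hgd p (List.mem_cons_of_mem _ hp)]

lemma pv_B_eq (ck : Int) (m : List (Int × List Int)) (dc : Option (List (Int × Int))) :
    compute_containment_depth_alt ck m dc
      = pvD m (PySem.Dict.mk (dc.getD [])) ((pvNodes ck m).length + 1) ck := by
  show ((List.range ((pvNodes ck m).length + 1)).foldl
      (fun tbl _ => pvRound m (PySem.Dict.mk (dc.getD [])) (pvNodes ck m) tbl)
      (pvInit ck m)).getD ck 0 = _
  rw [pv_range_foldl, PySem.Dict.getD_eq_get?_getD,
    pv_B_val ck m (PySem.Dict.mk (dc.getD [])) ((pvNodes ck m).length + 1) ck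
      (pv_mem_nodes_self ck m)]
  rfl

lemma pv_A_eq (ck : Int) (m : List (Int × List Int)) (dc : Option (List (Int × Int)))
    (HP : ∀ k ∈ pvRch ck m (PySem.Dict.mk (dc.getD [])) ck,
      (PySem.Dict.mk (dc.getD [])).get? k = none → ∀ p ∈ pvAdj m k,
      k ∉ pvRch ck m (PySem.Dict.mk (dc.getD [])) p) :
    compute_containment_depth ck m dc
      = pvD m (PySem.Dict.mk (dc.getD []))
          (pvRank ck m (PySem.Dict.mk (dc.getD [])) ck) ck := by
  unfold compute_containment_depth
  set c0 := PySem.Dict.mk (dc.getD []) with hc0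
  have hrank : pvRank ck m c0 ck ≤ pvFuel ck m := by
    have h1 : pvRch ck m c0 ck ⊆ ck :: m.flatMap Prod.snd := pv_rch_bounded ck m c0 ck
    have h2 := pv_nodup_subset_length (pv_rch_nodup ck m c0 ck) h1
    unfold pvRank
    simp only [pvFuel, List.length_cons, List.length_append, List.length_map] at h2 ⊢
    omega
  have hinv : pvInv ck m c0 c0 := ⟨pv_ext_refl c0, fun x v hx => Or.inl hx⟩
  exact (pv_A_correct ck m c0 HP (pvFuel ck m) ck c0 (pv_mem_rch_self ck m c0 ck) hrank hinv).1

-- ===== VERDICT (by name: the statement is the Claim_ definition above) =====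
theorem compute_containment_depth_spec : Claim_equal_compute_containment_depth := by
  intro ck m dc _ hpre
  unfold Spec_compute_containment_depth
  have HP := hpre
  unfold Pre_compute_containment_depth at HP
  rw [pv_A_eq ck m dc HP, pv_B_eq ck m dc]
  have hsub : pvRch ck m (PySem.Dict.mk (dc.getD [])) ck ⊆ pvNodes ck m :=
    pv_rch_least ck m (PySem.Dict.mk (dc.getD [])) ck (pv_mem_nodes_self ck m)
      (fun k _ _ p hp => pv_adj_mem_nodes ck m hp)
  have hlen : pvRank ck m (PySem.Dict.mk (dc.getD [])) ck ≤ (pvNodes ck m).length :=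
    pv_nodup_subset_length (pv_rch_nodup ck m (PySem.Dict.mk (dc.getD [])) ck) hsub
  exact pv_stable ck m (PySem.Dict.mk (dc.getD [])) HP
    (pvRank ck m (PySem.Dict.mk (dc.getD [])) ck) ck
    (pv_mem_rch_self ck m (PySem.Dict.mk (dc.getD [])) ck)
    ((pvNodes ck m).length + 1) le_rfl (by omega)
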